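-- pv_equiv track=rewrite | github.com/adithyaha/Hackerrank-Python | Capitalize.py | solve
-- ===== SOURCE A (Python) =====
-- def solve(s):
--     capitalized = ""
--     capitalize_next = True
--     for c in s:
--         if c.isspace():
--             capitalized += c
--             capitalize_next = True
--         elif c.isalnum() and capitalize_next:
--             capitalized += c.upper()
--             capitalize_next = False
--         else:
--             capitalized += c.lower()
--     return capitalized
-- ===== SOURCE B (Python) =====
-- def solve(s):
--     # Tokenize into alternating whitespace/word runs, transform each word run,
--     # join at the end (single-pass char-append scan replaced by run-level pass).
--     pieces = []
--     i, n = 0, len(s)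
--     while i < n:
--         sp = s[i].isspace()
--         j = i + 1
--         while j < n and s[j].isspace() == sp:
--             j += 1
--         run = s[i:j]
--         if sp:
--             pieces.append(run)
--         else:
--             buf = []
--             done = False
--             for c in run:
--                 if not done and c.isalnum():
--                     buf.append(c.upper())
--                     done = True
--                 else:
--                     buf.append(c.lower())
--             pieces.append(''.join(buf))
--         i = j
--     return ''.join(pieces)
-- ===== Notes on version B (the rewrite author's own statement) =====
-- stated objective: alternative
-- what changed: Replaces the flag-driven per-character append scan by a tokenize-then-transform pass: split s into maximal whitespace/word runs, copy whitespace runs verbatim, rewrite each word run with a per-word first-alnum flag, and join the pieces.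
import Mathlib
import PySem

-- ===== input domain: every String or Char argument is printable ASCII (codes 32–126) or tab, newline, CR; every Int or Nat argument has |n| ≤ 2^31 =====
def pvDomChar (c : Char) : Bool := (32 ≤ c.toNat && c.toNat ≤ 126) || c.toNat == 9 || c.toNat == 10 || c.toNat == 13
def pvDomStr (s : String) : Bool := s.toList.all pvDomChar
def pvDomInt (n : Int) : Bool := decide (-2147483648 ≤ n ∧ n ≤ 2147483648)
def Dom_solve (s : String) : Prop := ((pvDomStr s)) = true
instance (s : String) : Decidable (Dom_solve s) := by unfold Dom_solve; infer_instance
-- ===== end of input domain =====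

-- B replaces A's single flag-driven char scan by a tokenize-then-transform pass over
-- whitespace/word runs; same return value, no side effects in either version.

-- ===== PORT A =====
-- the for-loop of A: state (accumulated string, capitalize_next flag)
def solveGo : List Char → List Char → Bool → List Char
  | [], acc, _ => acc
  | c :: rest, acc, flag =>
    if PySem.Chars.isspace c then solveGo rest (acc ++ [c]) true
    else if PySem.Chars.isalnum c && flag then solveGo rest (acc ++ [PySem.Chars.upperChar c]) false
    else solveGo rest (acc ++ [PySem.Chars.lowerChar c]) flag

def solve (s : String) : String := String.ofList (solveGo s.toList [] true)

-- ===== PORT B =====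
-- the outer while loop of Source B: split into maximal runs of equal isspace-class
def tokenize : List Char → List (List Char)
  | [] => []
  | c :: rest =>
    (c :: rest.takeWhile (fun x => PySem.Chars.isspace x == PySem.Chars.isspace c)) ::
      tokenize (rest.dropWhile (fun x => PySem.Chars.isspace x == PySem.Chars.isspace c))
termination_by cs => cs.length
decreasing_by
  simpa using Nat.lt_succ_of_le (List.length_dropWhile_le _ _)

-- the inner for-loop of Source B over a word run, with its `done` flag
def capWord : List Char → Bool → List Char
  | [], _ => []
  | c :: rest, done =>
    if !done && PySem.Chars.isalnum c then PySem.Chars.upperChar c :: capWord rest true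
    else PySem.Chars.lowerChar c :: capWord rest done

-- the body of the outer loop: whitespace run verbatim, word run transformed
def piece (run : List Char) : List Char :=
  match run with
  | [] => []
  | c :: _ => if PySem.Chars.isspace c then run else capWord run false

def solve_alt (s : String) : String := String.ofList ((tokenize s.toList).flatMap piece)

-- ===== PRECONDITION & SPEC =====
def Spec_solve (s : String) (out : String) : Prop := out = solve_alt s
instance (s : String) (out : String) : Decidable (Spec_solve s out) := by unfold Spec_solve; infer_instance

-- ===== CLAIM (what is proved, stated in full; the proofs are below) =====
def Claim_equal_solve : Prop := ∀ (s : String), Dom_solve s → Spec_solve s (solve s)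

-- ===== LEMMAS AND PROOFS =====

-- accumulator-free form of A's loop
def gA : List Char → Bool → List Char
  | [], _ => []
  | c :: rest, flag =>
    if PySem.Chars.isspace c then c :: gA rest true
    else if PySem.Chars.isalnum c && flag then PySem.Chars.upperChar c :: gA rest false
    else PySem.Chars.lowerChar c :: gA rest flag

lemma solveGo_eq_gA (cs : List Char) (acc : List Char) (flag : Bool) :
    solveGo cs acc flag = acc ++ gA cs flag := by
  induction cs generalizing acc flag with
  | nil => simp [solveGo, gA]
  | cons c rest ih =>
    simp only [solveGo, gA]
    split_ifs <;> simp [ih]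

lemma gA_ws (w t : List Char) (hw : ∀ x ∈ w, PySem.Chars.isspace x = true) :
    gA (w ++ t) true = w ++ gA t true := by
  induction w with
  | nil => simp
  | cons c w' ih =>
    have hc := hw c (by simp)
    simp only [List.cons_append, gA, hc, if_true]
    exact congrArg (c :: ·) (ih fun x hx => hw x (by simp [hx]))

lemma gA_word (w : List Char) (hw : ∀ x ∈ w, PySem.Chars.isspace x = false) :
    ∀ (t : List Char) (f : Bool),
      gA (w ++ t) f = capWord w (!f) ++ gA t (f && !(w.any PySem.Chars.isalnum)) := by
  induction w with
  | nil => intro t f; cases f <;> simp [capWord]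
  | cons c w' ih =>
    intro t f
    have hc := hw c (by simp)
    have ih' := ih fun x hx => hw x (by simp [hx])
    cases f <;> by_cases h : PySem.Chars.isalnum c = true <;>
      simp [gA, capWord, hc, h, ih', List.any_cons]

lemma head?_dropWhile_false {α : Type} (p : α → Bool) (l : List α) :
    ∀ c, (l.dropWhile p).head? = some c → p c = false := by
  induction l with
  | nil => simp
  | cons a t ih =>
    intro c hc
    by_cases h : p a = true
    · rw [List.dropWhile_cons_of_pos h] at hc; exact ih c hc
    · rw [List.dropWhile_cons_of_neg h] at hc
      cases hc; simpa using h

lemma gA_flag_space_head (t : List Char)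
    (ht : ∀ c, t.head? = some c → PySem.Chars.isspace c = true) (f : Bool) :
    gA t f = gA t true := by
  cases t with
  | nil => rfl
  | cons c t' =>
    have hc := ht c rfl
    simp [gA, hc]

lemma gA_eq_flatMap (cs : List Char) :
    gA cs true = (tokenize cs).flatMap piece := by
  induction cs using tokenize.induct with
  | case1 => simp [gA, tokenize]
  | case2 c rest ih =>
    rw [tokenize]
    set p := fun x => PySem.Chars.isspace x == PySem.Chars.isspace c with hp
    have hsplit : c :: rest = (c :: rest.takeWhile p) ++ rest.dropWhile p := by
      simp [List.takeWhile_append_dropWhile]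
    have htk : ∀ x ∈ rest.takeWhile p, PySem.Chars.isspace x = PySem.Chars.isspace c := by
      intro x hx
      have := List.mem_takeWhile_imp hx
      simpa [hp] using this
    have hhd : ∀ d, (rest.dropWhile p).head? = some d →
        PySem.Chars.isspace d = !PySem.Chars.isspace c := by
      intro d hd
      have := head?_dropWhile_false p rest d hd
      simp only [hp, beq_eq_false_iff_ne, ne_eq] at this
      cases hs : PySem.Chars.isspace c <;> cases hd2 : PySem.Chars.isspace d <;>
        simp_all
    by_cases hc : PySem.Chars.isspace c = true
    · have hws : ∀ x ∈ c :: rest.takeWhile p, PySem.Chars.isspace x = true := by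
        intro x hx
        rcases List.mem_cons.mp hx with h | h
        · simpa [h] using hc
        · rw [htk x h, hc]
      rw [hsplit, gA_ws _ _ hws, ih]
      simp [piece, hc]
    · have hc' : PySem.Chars.isspace c = false := by simpa using hc
      have hword : ∀ x ∈ c :: rest.takeWhile p, PySem.Chars.isspace x = false := by
        intro x hx
        rcases List.mem_cons.mp hx with h | h
        · simpa [h] using hc'
        · rw [htk x h, hc']
      have hhd' : ∀ d, (rest.dropWhile p).head? = some d → PySem.Chars.isspace d = true := by
        intro d hd; rw [hhd d hd, hc']; rfl
      rw [hsplit, gA_word _ hword _ true,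
        gA_flag_space_head _ hhd', ih]
      simp [piece, hc']

-- ===== VERDICT (by name: the statement is the Claim_ definition above) =====
theorem solve_spec : Claim_equal_solve := by
  intro s _
  show solve s = solve_alt s
  unfold solve solve_alt
  rw [solveGo_eq_gA, gA_eq_flatMap]
  rfl
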